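-- pv_equiv track=rewrite | github.com/cloudspurs/androidEclipse | Android/WebContent/RelFix/Analyze/dynamic_judge.py | obtain_param_info
-- ===== SOURCE A (Python) =====
-- def obtain_param_info(completed_method_line):
--     return_value_list = []
--     arg_num = 0
--
--     if not 'static' in completed_method_line.split(' '):
--         return_value_list.append(3)
--         arg_num += 1
--
--     origin_parameter_str = (completed_method_line.split('(')[1]).split(')')[0]
--     index = 0
--     L_flag = 0
--     array_flag = 0
--     while index < len(origin_parameter_str):
--         char = origin_parameter_str[index]
--
--         if '[' == char:
--             if 0 == array_flag:
--                 array_flag = 1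
--                 arg_num += 1
--                 return_value_list.append(3)
--
--         if 0 == L_flag and 'L' == char:
--             L_flag = 1
--
--             if 0 == array_flag:
--                 arg_num += 1
--                 return_value_list.append(3)
--
--         if 0 == L_flag and ('Z' == char or 'B' == char or 'S' == char or 'C' == char or 'I' == char or 'F' == char):
--             if 0 == array_flag:
--                 arg_num += 1
--                 return_value_list.append(1)
--
--             if 1 == array_flag:
--                 array_flag = 0
--
--         if 0 == L_flag and ('D' == char or 'J' == char):
--             if 0 == array_flag:
--                 arg_num += 2
--                 return_value_list.append(2)
--                 return_value_list.append(0)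
--
--             if 1 == array_flag:
--                 array_flag = 0
--
--         if ';' == char:
--             L_flag = 0
--             array_flag = 0
--
--         index += 1
--
--     return_value_list.insert(0, arg_num)
--     return return_value_list
-- ===== SOURCE B (Python) =====
-- def obtain_param_info(completed_method_line):
--     out = []
--     if 'static' not in completed_method_line.split(' '):
--         out.append(3)
--     s = completed_method_line.split('(')[1].split(')')[0]
--     i, n = 0, len(s)
--     while i < n:
--         c = s[i]
--         if c == '[':
--             out.append(3)
--             # step past the dimension brackets (and anything unexpected) to the element type
--             while i < n and s[i] not in 'LZBSCIFDJ;':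
--                 i += 1
--             if i < n and s[i] == 'L':
--                 while i < n and s[i] != ';':
--                     i += 1
--             i += 1  # consume the element char (or its closing ';')
--         elif c == 'L':
--             out.append(3)
--             i += 1
--             while i < n and s[i] != ';':
--                 i += 1
--             i += 1
--         elif c in 'ZBSCIF':
--             out.append(1)
--             i += 1
--         elif c in 'DJ':
--             out.append(2)
--             out.append(0)
--             i += 1
--         else:
--             i += 1
--     return [len(out)] + out
-- ===== Notes on version B (the rewrite author's own statement) =====
-- stated objective: simpler
-- what changed: Replaces A's per-character L_flag/array_flag state machine with an index-advancing scanner that consumes each parameter type (array element, L...; class name, primitive) in one step and derives arg_num as the length of the emitted list; Pre_ excludes only lines without '(', where A raises IndexError.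
-- intended difference: On malformed descriptors whose parameter list contains a '[' inside a non-array parameter's class name (L...;), A appends a spurious extra parameter code 3 and counts an extra slot for that bracket; B treats the whole L...; as the single object parameter already emitted, which is the intended parse of a class descriptor. — e.g. on obtain_param_info("m(L[;)"): A returns [3, 3, 3, 3], B returns [2, 3, 3]
import Mathlib
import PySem

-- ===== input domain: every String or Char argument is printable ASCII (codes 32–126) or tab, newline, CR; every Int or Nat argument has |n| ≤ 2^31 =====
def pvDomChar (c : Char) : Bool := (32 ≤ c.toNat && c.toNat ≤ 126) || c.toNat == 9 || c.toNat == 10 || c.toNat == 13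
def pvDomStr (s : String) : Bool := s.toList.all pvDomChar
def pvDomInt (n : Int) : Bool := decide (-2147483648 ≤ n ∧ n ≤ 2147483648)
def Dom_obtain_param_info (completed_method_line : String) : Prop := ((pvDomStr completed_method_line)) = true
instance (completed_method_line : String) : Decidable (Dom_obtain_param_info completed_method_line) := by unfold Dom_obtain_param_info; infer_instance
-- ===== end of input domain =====

-- B replaces A's per-character flag machine (L_flag/array_flag) with an index-advancing
-- scanner that consumes each parameter type in one step; on malformed descriptors with a
-- '[' inside a class name A emits a spurious parameter (see D_ below), B parses the class name whole.


-- ===== PORT A =====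
-- (split('(')[1]).split(')')[0]: the parameter substring; index 1 is in range exactly under
-- Pre_ (the line contains '(')
def pvOriginOf (completed_method_line : String) : String :=
  PySem.List.pyGetD
      (((PySem.Str.split? (PySem.List.pyGetD ((PySem.Str.split? completed_method_line "(").getD []) 1 "") ")").getD [])) 0 ""

-- one iteration of A's while loop: state = (return_value_list, arg_num, L_flag, array_flag);
-- A's sequential ifs test pairwise-disjoint characters, written here as the equivalent chain
def aStep (st : List Int × Int × Nat × Nat) (c : Char) : List Int × Int × Nat × Nat :=
  let rv := st.1
  let arg := st.2.1
  let lf := st.2.2.1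
  let af := st.2.2.2
  if c = '[' then
    (if af = 0 then (rv ++ [3], arg + 1, lf, 1) else (rv, arg, lf, af))
  else if lf = 0 ∧ c = 'L' then
    (if af = 0 then (rv ++ [3], arg + 1, 1, af) else (rv, arg, 1, af))
  else if lf = 0 ∧ (c = 'Z' ∨ c = 'B' ∨ c = 'S' ∨ c = 'C' ∨ c = 'I' ∨ c = 'F') then
    (if af = 0 then (rv ++ [1], arg + 1, lf, af) else (rv, arg, lf, 0))
  else if lf = 0 ∧ (c = 'D' ∨ c = 'J') then
    (if af = 0 then (rv ++ [2, 0], arg + 2, lf, af) else (rv, arg, lf, 0))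
  else if c = ';' then (rv, arg, 0, 0)
  else (rv, arg, lf, af)

def obtain_param_info (completed_method_line : String) : List Int :=
  let rv0 : List Int := if "static" ∈ ((PySem.Str.split? completed_method_line " ").getD []) then [] else [3]
  let arg0 : Int := if "static" ∈ ((PySem.Str.split? completed_method_line " ").getD []) then 0 else 1
  let origin := pvOriginOf completed_method_line
  let st := origin.toList.foldl aStep (rv0, arg0, 0, 0)
  st.2.1 :: st.1

-- ===== PORT B =====
def pvIsElem (c : Char) : Bool := c ∈ ['L', 'Z', 'B', 'S', 'C', 'I', 'F', 'D', 'J', ';']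

def pvPrim32 (c : Char) : Bool := c = 'Z' || c = 'B' || c = 'S' || c = 'C' || c = 'I' || c = 'F'

-- Source B: while i<n and s[i] not in 'LZBSCIFDJ;': i += 1
def pvSkipJunk : List Char → List Char
  | [] => []
  | c :: rest => if pvIsElem c then c :: rest else pvSkipJunk rest

-- Source B: while i<n and s[i] != ';': i += 1
def pvSkipToSemi : List Char → List Char
  | [] => []
  | c :: rest => if c = ';' then c :: rest else pvSkipToSemi rest

-- Source B '[' case after the emit: step past brackets/junk, then consume the element (an L...; or one char)
def pvArrNext (l : List Char) : List Char :=
  match pvSkipJunk l with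
  | 'L' :: r => (pvSkipToSemi r).drop 1
  | t => t.drop 1

-- Source B's "while i < n" loop: the remaining character budget n - i is the structural fuel
def bLoop : Nat → List Char → List Int
  | 0, _ => []
  | _ + 1, [] => []
  | fuel + 1, c :: rest =>
    if c = '[' then 3 :: bLoop fuel (pvArrNext rest)
    else if c = 'L' then 3 :: bLoop fuel ((pvSkipToSemi rest).drop 1)
    else if pvPrim32 c then 1 :: bLoop fuel rest
    else if c = 'D' ∨ c = 'J' then 2 :: 0 :: bLoop fuel rest
    else bLoop fuel rest

def obtain_param_info_alt (completed_method_line : String) : List Int :=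
  let origin := pvOriginOf completed_method_line
  let out := (if "static" ∈ ((PySem.Str.split? completed_method_line " ").getD []) then [] else [3]) ++ bLoop origin.toList.length origin.toList
  (out.length : Int) :: out

-- ===== PRECONDITION & SPEC =====
-- Pre_ excludes exactly the lines with no '(': there A's split('(')[1] raises IndexError (B raises too)
def Pre_obtain_param_info (completed_method_line : String) : Prop :=
  PySem.Str.isIn "(" completed_method_line = true
instance (completed_method_line : String) : Decidable (Pre_obtain_param_info completed_method_line) := by
  unfold Pre_obtain_param_info; infer_instance

def pvWitness_obtain_param_info : String := "void m(I[JLjava/lang/String;)"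

-- the difference region, read off the input alone: scan the parameter substring with the
-- grammar's four modes (0 = between parameters, 1 = inside a class name L…;, 2 = after array
-- brackets awaiting the element type, 3 = inside an array element's class name); the flag is
-- set iff a '[' occurs inside a non-array parameter's class name
def dStep (st : Nat × Bool) (c : Char) : Nat × Bool :=
  (if st.1 % 2 = 1 then (if c = ';' then 0 else st.1)
   else if st.1 = 0 then (if c = '[' then 2 else if c = 'L' then 1 else 0)
   else if c = 'L' then 3
   else if "ZBSCIFDJ;".toList.contains c then 0
   else 2,
   st.2 || (st.1 == 1 && c == '['))

-- On malformed descriptors whose parameter list has a '[' inside a class name (L…;), A appends a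
-- spurious parameter code 3 (and counts an extra slot) for a character that is part of a class
-- name; B treats the whole L…; as the one object parameter already emitted, the intended parse.
def D_obtain_param_info (completed_method_line : String) : Prop :=
  (List.foldl dStep (0, false) (String.toList (pvOriginOf completed_method_line))).2 = true
instance (completed_method_line : String) : Decidable (D_obtain_param_info completed_method_line) := by
  unfold D_obtain_param_info; infer_instance

def Spec_obtain_param_info (completed_method_line : String) (out : List Int) : Prop :=
  ¬ D_obtain_param_info completed_method_line → out = obtain_param_info_alt completed_method_line
instance (completed_method_line : String) (out : List Int) : Decidable (Spec_obtain_param_info completed_method_line out) := by unfold Spec_obtain_param_info; infer_instance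

def pvDiffWitness_obtain_param_info : String := "m(L[;)"
def pvDiffWitnessOut_obtain_param_info : (List Int) × (List Int) := ([3, 3, 3, 3], [2, 3, 3])

-- ===== CLAIM (what is proved, stated in full; the proofs are below) =====
def Claim_unchanged_obtain_param_info : Prop := ∀ (completed_method_line : String), Dom_obtain_param_info completed_method_line → Pre_obtain_param_info completed_method_line → Spec_obtain_param_info completed_method_line (obtain_param_info completed_method_line)
def Claim_changed_obtain_param_info : Prop := Dom_obtain_param_info (pvDiffWitness_obtain_param_info) ∧ Pre_obtain_param_info (pvDiffWitness_obtain_param_info) ∧ D_obtain_param_info (pvDiffWitness_obtain_param_info) ∧ obtain_param_info (pvDiffWitness_obtain_param_info) = pvDiffWitnessOut_obtain_param_info.1 ∧ obtain_param_info_alt (pvDiffWitness_obtain_param_info) = pvDiffWitnessOut_obtain_param_info.2 ∧ pvDiffWitnessOut_obtain_param_info.1 ≠ pvDiffWitnessOut_obtain_param_info.2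
def Claim_exact_obtain_param_info : Prop := ∀ (completed_method_line : String), Dom_obtain_param_info completed_method_line → Pre_obtain_param_info completed_method_line → D_obtain_param_info completed_method_line → obtain_param_info completed_method_line ≠ obtain_param_info_alt completed_method_line

-- ===== LEMMAS AND PROOFS =====

theorem pvSkipJunk_len (l : List Char) : (pvSkipJunk l).length ≤ l.length := by
  induction l with
  | nil => simp [pvSkipJunk]
  | cons c r ih => simp only [pvSkipJunk]; split <;> simp <;> omega

theorem pvSkipToSemi_len (l : List Char) : (pvSkipToSemi l).length ≤ l.length := by
  induction l with
  | nil => simp [pvSkipToSemi]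
  | cons c r ih => simp only [pvSkipToSemi]; split <;> simp <;> omega

theorem pvArrNext_len (l : List Char) : (pvArrNext l).length ≤ l.length := by
  unfold pvArrNext
  have h1 := pvSkipJunk_len l
  split
  · rename_i r heq
    have h2 := pvSkipToSemi_len r
    have : r.length + 1 = (pvSkipJunk l).length := by rw [heq]; simp
    have := List.length_drop (l := pvSkipToSemi r) (i := 1)
    omega
  · have := List.length_drop (l := pvSkipJunk l) (i := 1)
    omega

-- proof-side view of dStep's scan as four mutually recursive mode predicates
mutual
def dClean : List Char → Bool
  | [] => false
  | c :: r => if c = '[' then dArr r else if c = 'L' then dClass r else dClean r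
def dClass : List Char → Bool
  | [] => false
  | c :: r => if c = '[' then true else if c = ';' then dClean r else dClass r
def dArr : List Char → Bool
  | [] => false
  | c :: r =>
    if c = 'L' then dSkip r
    else if c = 'Z' ∨ c = 'B' ∨ c = 'S' ∨ c = 'C' ∨ c = 'I' ∨ c = 'F' ∨ c = 'D' ∨ c = 'J' ∨ c = ';' then dClean r
    else dArr r
def dSkip : List Char → Bool
  | [] => false
  | c :: r => if c = ';' then dClean r else dSkip r
end

-- the foldl scan computes exactly these predicates
theorem dFold (l : List Char) :
    (∀ b, (l.foldl dStep (0, b)).2 = (b || dClean l)) ∧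
    (∀ b, (l.foldl dStep (1, b)).2 = (b || dClass l)) ∧
    (∀ b, (l.foldl dStep (2, b)).2 = (b || dArr l)) ∧
    (∀ b, (l.foldl dStep (3, b)).2 = (b || dSkip l)) := by
  induction l with
  | nil => simp [dClean, dClass, dArr, dSkip]
  | cons c r ih =>
    obtain ⟨i0, i1, i2, i3⟩ := ih
    refine ⟨fun b => ?_, fun b => ?_, fun b => ?_, fun b => ?_⟩ <;>
      simp only [List.foldl_cons, dStep] <;> split_ifs <;> cases b <;>
      (try by_cases hb : c = '[') <;> simp_all [Bool.beq_eq_decide_eq, dClean, dClass, dArr, dSkip]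

-- projection of A's loop state to the observable part (return_value_list, arg_num)
def pr (st : List Int × Int × Nat × Nat) : List Int × Int := (st.1, st.2.1)

-- characterization of aStep in each flag configuration
theorem aStep_lf_one (rv : List Int) (arg : Int) (af : Nat) (c : Char) :
    aStep (rv, arg, 1, af) c =
      (if c = '[' then (if af = 0 then (rv ++ [3], arg + 1, 1, 1) else (rv, arg, 1, af))
       else if c = ';' then (rv, arg, 0, 0) else (rv, arg, 1, af)) := by
  unfold aStep; split_ifs <;> simp_all

theorem aStep_af_one (rv : List Int) (arg : Int) (c : Char) :
    aStep (rv, arg, 0, 1) c =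
      (if c = 'L' then (rv, arg, 1, 1)
       else if pvPrim32 c = true ∨ c = 'D' ∨ c = 'J' ∨ c = ';' then (rv, arg, 0, 0)
       else (rv, arg, 0, 1)) := by
  unfold aStep pvPrim32; split_ifs <;> (try simp_all) <;> tauto

theorem aStep_clean (rv : List Int) (arg : Int) (c : Char) :
    aStep (rv, arg, 0, 0) c =
      (if c = '[' then (rv ++ [3], arg + 1, 0, 1)
       else if c = 'L' then (rv ++ [3], arg + 1, 1, 0)
       else if pvPrim32 c = true then (rv ++ [1], arg + 1, 0, 0)
       else if c = 'D' ∨ c = 'J' then (rv ++ [2, 0], arg + 2, 0, 0)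
       else (rv, arg, 0, 0)) := by
  unfold aStep pvPrim32; split_ifs <;> (try simp_all) <;> tauto

-- in state (L_flag, array_flag) = (1, 1) A ignores everything up to the next ';'
theorem fold11 (l : List Char) (rv : List Int) (arg : Int) :
    pr (l.foldl aStep (rv, arg, 1, 1)) =
      pr (((pvSkipToSemi l).drop 1).foldl aStep (rv, arg, 0, 0)) := by
  induction l with
  | nil => simp [pvSkipToSemi, pr]
  | cons c r ih =>
    by_cases hc : c = ';'
    · subst hc; simp [pvSkipToSemi, List.foldl_cons, aStep_lf_one]
    · simp [pvSkipToSemi, hc, List.foldl_cons, aStep_lf_one, ih]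

-- dSkip relates to the remainder after the skipped ';'
theorem dSkip_rest (l : List Char) (h : dSkip l = false) :
    dClean ((pvSkipToSemi l).drop 1) = false := by
  induction l with
  | nil => simpa [pvSkipToSemi, dClean]
  | cons c r ih =>
    by_cases hc : c = ';'
    · subst hc; simp [pvSkipToSemi]; simpa [dSkip] using h
    · rw [show pvSkipToSemi (c :: r) = pvSkipToSemi r from by simp [pvSkipToSemi, hc]]
      exact ih (by simpa [dSkip, hc] using h)

-- in state (1, 0) — inside a top-level L...; — and with no '[' before the closing ';',
-- A just waits for the ';'
theorem fold10 (l : List Char) (rv : List Int) (arg : Int) (h : dClass l = false) :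
    pr (l.foldl aStep (rv, arg, 1, 0)) =
      pr (((pvSkipToSemi l).drop 1).foldl aStep (rv, arg, 0, 0)) ∧
    dClean ((pvSkipToSemi l).drop 1) = false := by
  induction l with
  | nil => simp [pvSkipToSemi, pr, dClean]
  | cons c r ih =>
    have hb : c ≠ '[' := by rintro rfl; simp [dClass] at h
    by_cases hc : c = ';'
    · subst hc
      refine ⟨by simp [pvSkipToSemi, List.foldl_cons, aStep_lf_one], ?_⟩
      simp [pvSkipToSemi]; simpa [dClass] using h
    · have h' : dClass r = false := by simpa [dClass, hb, hc] using h
      have hst : pvSkipToSemi (c :: r) = pvSkipToSemi r := by simp [pvSkipToSemi, hc]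
      have := ih h'
      rw [hst]
      exact ⟨by simpa [List.foldl_cons, aStep_lf_one, hb, hc] using this.1, this.2⟩

-- in state (0, 1) — scanning an array element — A consumes exactly pvArrNext's prefix
theorem foldArr (l : List Char) (rv : List Int) (arg : Int) (h : dArr l = false) :
    pr (l.foldl aStep (rv, arg, 0, 1)) =
      pr ((pvArrNext l).foldl aStep (rv, arg, 0, 0)) ∧
    dClean (pvArrNext l) = false := by
  induction l with
  | nil => simp [pvArrNext, pvSkipJunk, pr, dClean]
  | cons c r ih =>
    by_cases he : pvIsElem c = true
    · have h10 : pvSkipJunk (c :: r) = c :: r := by simp [pvSkipJunk, he]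
      by_cases hL : c = 'L'
      · subst hL
        have hsk : dSkip r = false := by simpa [dArr] using h
        have hstep : aStep (rv, arg, 0, 1) 'L' = (rv, arg, 1, 1) := by simp [aStep_af_one]
        have harr : pvArrNext ('L' :: r) = (pvSkipToSemi r).drop 1 := by
          unfold pvArrNext; rw [h10]; rfl
        refine ⟨?_, by rw [harr]; exact dSkip_rest r hsk⟩
        simp only [List.foldl_cons, hstep]
        rw [fold11, harr]
      · have hcases : pvPrim32 c = true ∨ c = 'D' ∨ c = 'J' ∨ c = ';' := by
          simp [pvIsElem, pvPrim32] at he ⊢; rcases he with h|h|h|h|h|h|h|h|h|h <;> simp [h] at hL ⊢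
        have harr : pvArrNext (c :: r) = r := by
          unfold pvArrNext; rw [h10]
          cases hcases with
          | inl h => simp [pvPrim32] at h; rcases h with (((((rfl|rfl)|rfl)|rfl)|rfl)|rfl) <;> rfl
          | inr h => rcases h with rfl|rfl|rfl <;> rfl
        have hcl : dClean r = false := by
          have hcases' : c = 'Z' ∨ c = 'B' ∨ c = 'S' ∨ c = 'C' ∨ c = 'I' ∨ c = 'F' ∨ c = 'D' ∨ c = 'J' ∨ c = ';' := by
            simp [pvPrim32] at hcases; tauto
          have : c ≠ 'L' := hL
          simp [dArr, this, hcases'] at h; exact h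
        exact ⟨by simp [List.foldl_cons, aStep_af_one, hL, hcases, harr], by rw [harr]; exact hcl⟩
    · have hj : pvSkipJunk (c :: r) = pvSkipJunk r := by
        simp [pvSkipJunk, he]
      have hL : c ≠ 'L' := by rintro rfl; simp [pvIsElem] at he
      have hnc : ¬ (pvPrim32 c = true ∨ c = 'D' ∨ c = 'J' ∨ c = ';') := by
        simp [pvIsElem, pvPrim32] at he ⊢; tauto
      have harr : pvArrNext (c :: r) = pvArrNext r := by unfold pvArrNext; rw [hj]
      have h' : dArr r = false := by
        have hnc' : ¬ (c = 'Z' ∨ c = 'B' ∨ c = 'S' ∨ c = 'C' ∨ c = 'I' ∨ c = 'F' ∨ c = 'D' ∨ c = 'J' ∨ c = ';') := by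
          simp [pvPrim32] at hnc; tauto
        simpa [dArr, hL, hnc'] using h
      have := ih h'
      exact ⟨by simp [List.foldl_cons, aStep_af_one, hL, hnc, harr, this.1], by rw [harr]; exact this.2⟩

-- the main loop invariant: from the clean state, with no '[' inside a class name,
-- A's fold produces exactly B's scan
theorem fold_main (fuel : Nat) (l : List Char) (rv : List Int) (arg : Int)
    (hf : l.length ≤ fuel) (h : dClean l = false) :
    pr (l.foldl aStep (rv, arg, 0, 0)) = (rv ++ bLoop fuel l, arg + ((bLoop fuel l).length : Int)) := by
  match fuel, l with
  | 0, l =>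
    have : l = [] := by cases l <;> simp_all
    subst this; simp [bLoop, pr]
  | fuel + 1, [] => simp [bLoop, pr]
  | fuel + 1, c :: r =>
    by_cases hb : c = '['
    · subst hb
      have hlen := pvArrNext_len r
      have hA : dArr r = false := by simpa [dClean] using h
      have hstep : aStep (rv, arg, 0, 0) '[' = (rv ++ [3], arg + 1, 0, 1) := by simp [aStep_clean]
      simp only [List.foldl_cons, hstep]
      have hfa := foldArr r (rv ++ [3]) (arg + 1) hA
      rw [hfa.1, fold_main fuel (pvArrNext r) _ _ (by simp at hf; omega) hfa.2]
      simp [bLoop]; omega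
    · by_cases hL : c = 'L'
      · subst hL
        have hlen := pvSkipToSemi_len r
        have hdrop := List.length_drop (l := pvSkipToSemi r) (i := 1)
        have hC : dClass r = false := by simpa [dClean] using h
        have hstep : aStep (rv, arg, 0, 0) 'L' = (rv ++ [3], arg + 1, 1, 0) := by simp [aStep_clean]
        simp only [List.foldl_cons, hstep]
        have hfc := fold10 r (rv ++ [3]) (arg + 1) hC
        rw [hfc.1, fold_main fuel ((pvSkipToSemi r).drop 1) _ _ (by simp at hf; omega) hfc.2]
        simp [bLoop]; omega
      · have h' : dClean r = false := by simpa [dClean, hb, hL] using h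
        by_cases hp : pvPrim32 c = true
        · simp only [List.foldl_cons, aStep_clean, if_neg hb, if_neg hL, if_pos hp]
          rw [fold_main fuel r _ _ (by simp at hf; omega) h']
          simp [bLoop, hb, hL, hp]; omega
        · by_cases hd : c = 'D' ∨ c = 'J'
          · simp only [List.foldl_cons, aStep_clean, if_neg hb, if_neg hL, if_neg hp, if_pos hd]
            rw [fold_main fuel r _ _ (by simp at hf; omega) h']
            simp [bLoop, hb, hL, hp, hd]; omega
          · simp only [List.foldl_cons, aStep_clean, if_neg hb, if_neg hL, if_neg hp, if_neg hd]
            rw [fold_main fuel r _ _ (by simp at hf; omega) h']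
            simp [bLoop, hb, hL, hp, hd]


-- '[' before the closing ';' (or end) of a class name
def hasBr : List Char → Bool
  | [] => false
  | c :: r => if c = '[' then true else if c = ';' then false else hasBr r

-- unconditional version of fold10: in state (1, 0) A waits for ';', emitting one extra 3
-- exactly when a '[' occurs first
theorem fold10_any (l : List Char) (rv : List Int) (arg : Int) :
    pr (l.foldl aStep (rv, arg, 1, 0)) =
      pr (((pvSkipToSemi l).drop 1).foldl aStep
        (if hasBr l = true then (rv ++ [3], arg + 1, 0, 0) else (rv, arg, 0, 0))) := by
  induction l with
  | nil => simp [pvSkipToSemi, hasBr, pr]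
  | cons c r ih =>
    by_cases hb : c = '['
    · subst hb
      have hstep : aStep (rv, arg, 1, 0) '[' = (rv ++ [3], arg + 1, 1, 1) := by
        simp [aStep_lf_one]
      simp only [List.foldl_cons, hstep]
      rw [fold11]
      simp [hasBr, pvSkipToSemi]
    · by_cases hc : c = ';'
      · subst hc
        simp [pvSkipToSemi, hasBr, List.foldl_cons, aStep_lf_one]
      · have h1 : pvSkipToSemi (c :: r) = pvSkipToSemi r := by simp [pvSkipToSemi, hc]
        have h2 : hasBr (c :: r) = hasBr r := by simp [hasBr, hb, hc]
        rw [h1, h2]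
        simpa [List.foldl_cons, aStep_lf_one, hb, hc] using ih

-- unconditional version of foldArr
theorem foldArr_any (l : List Char) (rv : List Int) (arg : Int) :
    pr (l.foldl aStep (rv, arg, 0, 1)) =
      pr ((pvArrNext l).foldl aStep (rv, arg, 0, 0)) := by
  induction l with
  | nil => simp [pvArrNext, pvSkipJunk, pr]
  | cons c r ih =>
    by_cases he : pvIsElem c = true
    · have h10 : pvSkipJunk (c :: r) = c :: r := by simp [pvSkipJunk, he]
      by_cases hL : c = 'L'
      · subst hL
        have hstep : aStep (rv, arg, 0, 1) 'L' = (rv, arg, 1, 1) := by simp [aStep_af_one]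
        have harr : pvArrNext ('L' :: r) = (pvSkipToSemi r).drop 1 := by
          unfold pvArrNext; rw [h10]; rfl
        simp only [List.foldl_cons, hstep]
        rw [fold11, harr]
      · have hcases : pvPrim32 c = true ∨ c = 'D' ∨ c = 'J' ∨ c = ';' := by
          simp [pvIsElem, pvPrim32] at he ⊢; rcases he with h|h|h|h|h|h|h|h|h|h <;> simp [h] at hL ⊢
        have harr : pvArrNext (c :: r) = r := by
          unfold pvArrNext; rw [h10]
          cases hcases with
          | inl h => simp [pvPrim32] at h; rcases h with (((((rfl|rfl)|rfl)|rfl)|rfl)|rfl) <;> rfl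
          | inr h => rcases h with rfl|rfl|rfl <;> rfl
        simp [List.foldl_cons, aStep_af_one, hL, hcases, harr]
    · have hj : pvSkipJunk (c :: r) = pvSkipJunk r := by simp [pvSkipJunk, he]
      have hL : c ≠ 'L' := by rintro rfl; simp [pvIsElem] at he
      have hnc : ¬ (pvPrim32 c = true ∨ c = 'D' ∨ c = 'J' ∨ c = ';') := by
        simp [pvIsElem, pvPrim32] at he ⊢; tauto
      have harr : pvArrNext (c :: r) = pvArrNext r := by unfold pvArrNext; rw [hj]
      simp [List.foldl_cons, aStep_af_one, hL, hnc, harr, ih]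

-- the mode predicates propagate to the continuation points
theorem dSkip_eq (l : List Char) : dSkip l = dClean ((pvSkipToSemi l).drop 1) := by
  induction l with
  | nil => simp [dSkip, pvSkipToSemi, dClean]
  | cons c r ih =>
    by_cases hc : c = ';'
    · subst hc; simp [dSkip, pvSkipToSemi]
    · rw [show pvSkipToSemi (c :: r) = pvSkipToSemi r from by simp [pvSkipToSemi, hc]]
      simpa [dSkip, hc] using ih

theorem dArr_eq (l : List Char) : dArr l = dClean (pvArrNext l) := by
  induction l with
  | nil => simp [dArr, pvArrNext, pvSkipJunk, dClean]
  | cons c r ih =>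
    by_cases he : pvIsElem c = true
    · have h10 : pvSkipJunk (c :: r) = c :: r := by simp [pvSkipJunk, he]
      by_cases hL : c = 'L'
      · subst hL
        have harr : pvArrNext ('L' :: r) = (pvSkipToSemi r).drop 1 := by
          unfold pvArrNext; rw [h10]; rfl
        rw [harr, show dArr ('L' :: r) = dSkip r from by simp [dArr]]
        exact dSkip_eq r
      · have hcases : pvPrim32 c = true ∨ c = 'D' ∨ c = 'J' ∨ c = ';' := by
          simp [pvIsElem, pvPrim32] at he ⊢; rcases he with h|h|h|h|h|h|h|h|h|h <;> simp [h] at hL ⊢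
        have harr : pvArrNext (c :: r) = r := by
          unfold pvArrNext; rw [h10]
          cases hcases with
          | inl h => simp [pvPrim32] at h; rcases h with (((((rfl|rfl)|rfl)|rfl)|rfl)|rfl) <;> rfl
          | inr h => rcases h with rfl|rfl|rfl <;> rfl
        have hcases' : c = 'Z' ∨ c = 'B' ∨ c = 'S' ∨ c = 'C' ∨ c = 'I' ∨ c = 'F' ∨ c = 'D' ∨ c = 'J' ∨ c = ';' := by
          simp [pvPrim32] at hcases; tauto
        rw [harr]
        simp [dArr, hL, hcases']
    · have hj : pvSkipJunk (c :: r) = pvSkipJunk r := by simp [pvSkipJunk, he]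
      have hL : c ≠ 'L' := by rintro rfl; simp [pvIsElem] at he
      have hnc' : ¬ (c = 'Z' ∨ c = 'B' ∨ c = 'S' ∨ c = 'C' ∨ c = 'I' ∨ c = 'F' ∨ c = 'D' ∨ c = 'J' ∨ c = ';') := by
        simp [pvIsElem] at he ⊢; tauto
      have harr : pvArrNext (c :: r) = pvArrNext r := by unfold pvArrNext; rw [hj]
      rw [harr, show dArr (c :: r) = dArr r from by simp [dArr, hL, hnc']]
      exact ih

theorem dClass_eq (l : List Char) :
    dClass l = (hasBr l || dClean ((pvSkipToSemi l).drop 1)) := by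
  induction l with
  | nil => simp [dClass, hasBr, pvSkipToSemi, dClean]
  | cons c r ih =>
    by_cases hb : c = '['
    · subst hb; simp [dClass, hasBr]
    · by_cases hc : c = ';'
      · subst hc; simp [dClass, hasBr, pvSkipToSemi]
      · rw [show pvSkipToSemi (c :: r) = pvSkipToSemi r from by simp [pvSkipToSemi, hc]]
        simpa [dClass, hasBr, hb, hc] using ih

-- how many extra 3's A emits: one per class name containing a '['
def eClean : List Char → Nat
  | [] => 0
  | c :: r =>
    if c = '[' then eClean (pvArrNext r)
    else if c = 'L' then (if hasBr r then 1 else 0) + eClean ((pvSkipToSemi r).drop 1)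
    else eClean r
termination_by l => l.length
decreasing_by
  · have := pvArrNext_len r; simp; omega
  · have := pvSkipToSemi_len r
    have := List.length_drop (l := pvSkipToSemi r) (i := 1)
    simp; omega
  all_goals simp

-- A's list is B's list plus eClean extra entries
theorem fold_len (fuel : Nat) (l : List Char) (rv : List Int) (arg : Int)
    (hf : l.length ≤ fuel) :
    ((l.foldl aStep (rv, arg, 0, 0)).1).length
      = rv.length + (bLoop fuel l).length + eClean l := by
  match fuel, l with
  | 0, l =>
    have : l = [] := by cases l <;> simp_all
    subst this; simp [bLoop, eClean]
  | fuel + 1, [] => simp [bLoop, eClean]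
  | fuel + 1, c :: r =>
    by_cases hb : c = '['
    · subst hb
      have hlen := pvArrNext_len r
      have hstep : aStep (rv, arg, 0, 0) '[' = (rv ++ [3], arg + 1, 0, 1) := by simp [aStep_clean]
      simp only [List.foldl_cons, hstep]
      have hfa := congrArg Prod.fst (foldArr_any r (rv ++ [3]) (arg + 1))
      simp only [pr] at hfa
      rw [hfa, fold_len fuel (pvArrNext r) _ _ (by simp at hf; omega)]
      simp [bLoop, eClean]; omega
    · by_cases hL : c = 'L'
      · subst hL
        have hlen := pvSkipToSemi_len r
        have hdrop := List.length_drop (l := pvSkipToSemi r) (i := 1)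
        have hstep : aStep (rv, arg, 0, 0) 'L' = (rv ++ [3], arg + 1, 1, 0) := by simp [aStep_clean]
        simp only [List.foldl_cons, hstep]
        have hfc := congrArg Prod.fst (fold10_any r (rv ++ [3]) (arg + 1))
        simp only [pr] at hfc
        by_cases hbr : hasBr r = true
        · rw [if_pos hbr] at hfc
          rw [hfc, fold_len fuel ((pvSkipToSemi r).drop 1) _ _ (by simp at hf; omega)]
          simp [bLoop, eClean, hbr]; omega
        · rw [if_neg hbr] at hfc
          rw [hfc, fold_len fuel ((pvSkipToSemi r).drop 1) _ _ (by simp at hf; omega)]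
          simp only [Bool.not_eq_true] at hbr
          simp [bLoop, eClean, hbr]; omega
      · by_cases hp : pvPrim32 c = true
        · simp only [List.foldl_cons, aStep_clean, if_neg hb, if_neg hL, if_pos hp]
          rw [fold_len fuel r _ _ (by simp at hf; omega)]
          simp [bLoop, eClean, hb, hL, hp]; omega
        · by_cases hd : c = 'D' ∨ c = 'J'
          · simp only [List.foldl_cons, aStep_clean, if_neg hb, if_neg hL, if_neg hp, if_pos hd]
            rw [fold_len fuel r _ _ (by simp at hf; omega)]
            simp [bLoop, eClean, hb, hL, hp, hd]; omega
          · simp only [List.foldl_cons, aStep_clean, if_neg hb, if_neg hL, if_neg hp, if_neg hd]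
            rw [fold_len fuel r _ _ (by simp at hf; omega)]
            simp [bLoop, eClean, hb, hL, hp, hd]

-- inside the difference region at least one extra entry is emitted
theorem eClean_pos (l : List Char) (h : dClean l = true) : 1 ≤ eClean l := by
  match l with
  | [] => simp [dClean] at h
  | c :: r =>
    by_cases hb : c = '['
    · subst hb
      have hlen := pvArrNext_len r
      have hA : dClean (pvArrNext r) = true := by
        rw [← dArr_eq]; simpa [dClean] using h
      have := eClean_pos (pvArrNext r) hA
      simpa [eClean] using this
    · by_cases hL : c = 'L'
      · subst hL
        have hlen := pvSkipToSemi_len r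
        have hdrop := List.length_drop (l := pvSkipToSemi r) (i := 1)
        have hC : dClass r = true := by simpa [dClean] using h
        rw [dClass_eq] at hC
        by_cases hbr : hasBr r = true
        · simp [eClean, hbr]
        · simp only [Bool.not_eq_true] at hbr
          have hs : dClean ((pvSkipToSemi r).drop 1) = true := by simpa [hbr] using hC
          have := eClean_pos ((pvSkipToSemi r).drop 1) hs
          simpa [eClean, hbr] using this
      · have h' : dClean r = true := by simpa [dClean, hb, hL] using h
        have := eClean_pos r h'
        simpa [eClean, hb, hL] using this
termination_by l.length
decreasing_by
  · have := pvArrNext_len r; simp only [List.length_cons]; omega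
  · have := pvSkipToSemi_len r
    have := List.length_drop (l := pvSkipToSemi r) (i := 1)
    simp only [List.length_cons]; omega
  all_goals simp

theorem pv_head_len (bl : List Int) :
    ((1 : Int) + (bl.length : Int)) :: 3 :: bl = (((3 :: bl).length : Nat) : Int) :: 3 :: bl := by
  have h : (((3 :: bl).length : Nat) : Int) = 1 + (bl.length : Int) := by
    simp [List.length_cons]; omega
  rw [h]

set_option maxHeartbeats 1000000 in
-- ===== VERDICT (by name: the statement is the Claim_ definition above) =====
theorem obtain_param_info_spec : Claim_unchanged_obtain_param_info := by
  intro line _ _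
  unfold Spec_obtain_param_info
  intro hnd
  unfold D_obtain_param_info at hnd
  unfold obtain_param_info obtain_param_info_alt
  have hd : dClean (pvOriginOf line).toList = false := by
    have hf := (dFold (pvOriginOf line).toList).1 false
    simp only [Bool.false_or] at hf
    rw [← hf]
    simpa using hnd
  by_cases hs : "static" ∈ ((PySem.Str.split? line " ").getD [])
  · have h0 := fold_main _ (pvOriginOf line).toList [] 0 le_rfl hd
    simp only [pr, Prod.mk.injEq] at h0
    simp only [if_pos hs]
    rw [h0.1, h0.2]
    simp only [List.nil_append, zero_add]
  · have h0 := fold_main _ (pvOriginOf line).toList [3] 1 le_rfl hd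
    simp only [pr, Prod.mk.injEq] at h0
    simp only [if_neg hs]
    rw [h0.1, h0.2]
    simp only [List.singleton_append]
    exact pv_head_len _

theorem obtain_param_info_changed : Claim_changed_obtain_param_info := by
  unfold Claim_changed_obtain_param_info; decide

theorem obtain_param_info_tight : Claim_exact_obtain_param_info := by
  intro line _ _ hD
  have hcl : dClean (pvOriginOf line).toList = true := by
    have hf := (dFold (pvOriginOf line).toList).1 false
    simp only [Bool.false_or] at hf
    unfold D_obtain_param_info at hD
    rw [← hf]; exact hD
  have hpos := eClean_pos _ hcl
  intro hEq
  have hlen := congrArg List.length hEq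
  unfold obtain_param_info obtain_param_info_alt at hlen
  simp only [List.length_cons, List.length_append] at hlen
  by_cases hs : "static" ∈ ((PySem.Str.split? line " ").getD [])
  · have hA := fold_len (pvOriginOf line).toList.length (pvOriginOf line).toList [] 0 le_rfl
    rw [if_pos hs, if_pos hs] at hlen
    rw [hA] at hlen
    simp at hlen
    omega
  · have hA := fold_len (pvOriginOf line).toList.length (pvOriginOf line).toList [3] 1 le_rfl
    rw [if_neg hs, if_neg hs] at hlen
    rw [hA] at hlen
    simp at hlen
    omega
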